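-- pv_equiv track=rewrite | github.com/sergio-alv-per/advent-of-code-2023 | 19/problem2.py | evaluate_range_on_workflow
-- ===== SOURCE A (Python) =====
-- def evaluate_range_on_workflow(values_range, workflow):
--     ranges_with_destinations = []
--     working_range = values_range.copy()
--     for rule in workflow:
--         variable, comparator, value, destination = rule
--         if variable == "E":
--             ranges_with_destinations.append((working_range, destination))
--             return ranges_with_destinations
--         else:
--             var_lower_bound = working_range[variable][0]
--             var_upper_bound = working_range[variable][1]
--             if comparator == ">":
--                 if value < var_lower_bound:
--                     ranges_with_destinations.append((working_range, destination))
--                     return ranges_with_destinations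
--                 elif var_lower_bound <= value < var_upper_bound:
--                     new_range = working_range.copy()
--                     new_range[variable] = (value + 1, var_upper_bound)
--                     ranges_with_destinations.append((new_range, destination))
--                     working_range[variable] = (var_lower_bound, value)
--                 else:
--                     continue
--             else:
--                 if value > var_upper_bound:
--                     ranges_with_destinations.append((working_range, destination))
--                     return ranges_with_destinations
--                 elif var_lower_bound < value <= var_upper_bound:
--                     new_range = working_range.copy()
--                     new_range[variable] = (var_lower_bound, value - 1)
--                     ranges_with_destinations.append((new_range, destination))
--                     working_range[variable] = (value, var_upper_bound)
--                 else:
--                     continue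
--
--     return ranges_with_destinations
-- ===== SOURCE B (Python) =====
-- def evaluate_range_on_workflow(values_range, workflow):
--     # Recursive formulation: each rule's matched interval is computed as the
--     # intersection of the current interval with the rule's half-line (min/max),
--     # instead of A's comparator-specific four-way branch chains.
--     def go(working, rules):
--         if not rules:
--             return []
--         variable, comparator, value, destination = rules[0]
--         rest = rules[1:]
--         if variable == "E":
--             return [(working, destination)]
--         lo, hi = working[variable]
--         if comparator == ">":
--             a, b = max(lo, value + 1), hi
--         else:
--             a, b = lo, min(hi, value - 1)
--         if a <= lo and b >= hi:
--             # rule matches the whole current range: terminal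
--             return [(working, destination)]
--         if a <= b:
--             matched = dict(working)
--             matched[variable] = (a, b)
--             remaining = dict(working)
--             remaining[variable] = (lo, a - 1) if a > lo else (b + 1, hi)
--             return [(matched, destination)] + go(remaining, rest)
--         return go(working, rest)
--     return go(dict(values_range), workflow)
-- ===== Notes on version B (the rewrite author's own statement) =====
-- stated objective: alternative
-- what changed: B replaces A's comparator-specific four-way branch chains by a single matched interval computed as a min/max intersection (whole-match and split decided by interval emptiness tests), and replaces the accumulator loop by structural recursion over the rule list.
import Mathlib
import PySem

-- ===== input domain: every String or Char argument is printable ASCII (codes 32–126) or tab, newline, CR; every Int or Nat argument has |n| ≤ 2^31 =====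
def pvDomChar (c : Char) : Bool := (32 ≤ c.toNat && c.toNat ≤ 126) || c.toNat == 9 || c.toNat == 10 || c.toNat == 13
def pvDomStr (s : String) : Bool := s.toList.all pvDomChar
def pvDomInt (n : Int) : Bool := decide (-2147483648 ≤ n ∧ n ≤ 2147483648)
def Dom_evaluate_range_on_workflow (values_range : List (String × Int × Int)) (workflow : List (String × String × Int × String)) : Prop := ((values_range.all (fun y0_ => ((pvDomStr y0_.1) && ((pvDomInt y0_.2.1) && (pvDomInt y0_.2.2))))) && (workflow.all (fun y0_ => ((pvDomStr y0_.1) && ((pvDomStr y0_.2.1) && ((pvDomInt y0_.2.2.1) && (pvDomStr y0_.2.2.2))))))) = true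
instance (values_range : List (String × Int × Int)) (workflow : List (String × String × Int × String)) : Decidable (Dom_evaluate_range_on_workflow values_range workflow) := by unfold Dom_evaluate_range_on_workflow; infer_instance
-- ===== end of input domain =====

-- B replaces A's comparator-specific four-way branch chains by one interval
-- intersection computed with min/max, and the loop by structural recursion
-- (objective: alternative decomposition; same single pass, not faster).

-- ===== PORT A =====
-- loop of A: state = (accumulator, working dict); early returns are the non-recursive arms
def evalA_go (workflow : List (String × String × Int × String))
    (acc : List ((List (String × Int × Int)) × String))
    (working : PySem.Dict String (Int × Int)) :
    List ((List (String × Int × Int)) × String) :=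
  match workflow with
  | [] => acc
  | (var_, comparator, value, destination) :: rest =>
    if var_ == "E" then acc ++ [(working.items, destination)]
    else
      match working.get? var_ with
      | none => acc  -- Python raises KeyError here; Pre_ excludes these inputs
      | some (var_lower_bound, var_upper_bound) =>
        if comparator == ">" then
          if value < var_lower_bound then acc ++ [(working.items, destination)]
          else if var_lower_bound ≤ value ∧ value < var_upper_bound then
            evalA_go rest
              (acc ++ [((working.insert var_ (value + 1, var_upper_bound)).items, destination)])
              (working.insert var_ (var_lower_bound, value))
          else evalA_go rest acc working
        else
          if var_upper_bound < value then acc ++ [(working.items, destination)]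
          else if var_lower_bound < value ∧ value ≤ var_upper_bound then
            evalA_go rest
              (acc ++ [((working.insert var_ (var_lower_bound, value - 1)).items, destination)])
              (working.insert var_ (value, var_upper_bound))
          else evalA_go rest acc working

def evaluate_range_on_workflow (values_range : List (String × Int × Int)) (workflow : List (String × String × Int × String)) : List ((List (String × Int × Int)) × String) :=
  evalA_go workflow [] (PySem.Dict.ofList values_range)

-- ===== PORT B =====
-- recursive helper of B: matched interval (a, b) by min/max intersection
def evalB_go (working : PySem.Dict String (Int × Int))
    (rules : List (String × String × Int × String)) :
    List ((List (String × Int × Int)) × String) :=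
  match rules with
  | [] => []
  | (var_, comparator, value, destination) :: rest =>
    if var_ == "E" then [(working.items, destination)]
    else
      match working.get? var_ with
      | none => []  -- Python raises KeyError here; Pre_ excludes these inputs
      | some (lo, hi) =>
        let ab := if comparator == ">" then (max lo (value + 1), hi) else (lo, min hi (value - 1))
        let a := ab.1
        let b := ab.2
        if a ≤ lo ∧ hi ≤ b then [(working.items, destination)]
        else if a ≤ b then
          ((working.insert var_ (a, b)).items, destination) ::
            evalB_go (working.insert var_ (if lo < a then (lo, a - 1) else (b + 1, hi))) rest
        else evalB_go working rest

def evaluate_range_on_workflow_alt (values_range : List (String × Int × Int)) (workflow : List (String × String × Int × String)) : List ((List (String × Int × Int)) × String) :=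
  evalB_go (PySem.Dict.ofList values_range) workflow

-- ===== PRECONDITION & SPEC =====
-- Pre_ excludes inputs where a rule at-or-before the first "E" catch-all names a variable
-- missing from values_range: A (and B) raise KeyError there — slightly conservative, since
-- A may return earlier via a full-range-match rule before reaching the missing key.
def Pre_evaluate_range_on_workflow (values_range : List (String × Int × Int)) (workflow : List (String × String × Int × String)) : Prop :=
  ∀ r ∈ workflow.takeWhile (fun r => r.1 != "E"),
    ((PySem.Dict.ofList values_range).get? r.1).isSome = true

instance (values_range : List (String × Int × Int)) (workflow : List (String × String × Int × String)) : Decidable (Pre_evaluate_range_on_workflow values_range workflow) := by unfold Pre_evaluate_range_on_workflow; infer_instance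

def pvWitness_evaluate_range_on_workflow : (List (String × Int × Int)) × (List (String × String × Int × String)) :=
  ([("x", 1, 10), ("m", 2, 5)], [("x", ">", 3, "A"), ("m", "<", 4, "B"), ("E", "", 0, "R")])

def Spec_evaluate_range_on_workflow (values_range : List (String × Int × Int)) (workflow : List (String × String × Int × String)) (out : List ((List (String × Int × Int)) × String)) : Prop := out = evaluate_range_on_workflow_alt values_range workflow
instance (values_range : List (String × Int × Int)) (workflow : List (String × String × Int × String)) (out : List ((List (String × Int × Int)) × String)) : Decidable (Spec_evaluate_range_on_workflow values_range workflow out) := by unfold Spec_evaluate_range_on_workflow; infer_instance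

-- ===== CLAIM (what is proved, stated in full; the proofs are below) =====
def Claim_equal_evaluate_range_on_workflow : Prop := ∀ (values_range : List (String × Int × Int)) (workflow : List (String × String × Int × String)), Dom_evaluate_range_on_workflow values_range workflow → Pre_evaluate_range_on_workflow values_range workflow → Spec_evaluate_range_on_workflow values_range workflow (evaluate_range_on_workflow values_range workflow)

-- ===== LEMMAS AND PROOFS =====

-- keys available for lookup are unchanged by the overwrites both loops perform
lemma isSome_get?_insert (w : PySem.Dict String (Int × Int)) (k k' : String) (v : Int × Int)
    (h : (w.get? k').isSome = true) : ((w.insert k v).get? k').isSome = true := by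
  by_cases hk : k' = k
  · subst hk; simp [PySem.Dict.get?_insert_self]
  · rwa [PySem.Dict.get?_insert_of_ne _ _ hk]

-- the core correspondence: A's loop with accumulator = acc ++ B's recursion
lemma go_eq (rules : List (String × String × Int × String)) :
    ∀ (acc : List ((List (String × Int × Int)) × String)) (working : PySem.Dict String (Int × Int)),
    (∀ r ∈ rules.takeWhile (fun r => r.1 != "E"), ((working.get? r.1).isSome = true)) →
    evalA_go rules acc working = acc ++ evalB_go working rules := by
  induction rules with
  | nil => intro acc working _; simp [evalA_go, evalB_go]
  | cons rule rest ih =>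
    intro acc working hpre
    obtain ⟨var_, comparator, value, destination⟩ := rule
    by_cases hE : var_ = "E"
    · subst hE; simp [evalA_go, evalB_go]
    · have hEb : (var_ == "E") = false := by simp [hE]
      have htw : List.takeWhile (fun r => r.1 != "E") ((var_, comparator, value, destination) :: rest)
          = (var_, comparator, value, destination) :: rest.takeWhile (fun r => r.1 != "E") := by
        simp [hE]
      have hmem : ((working.get? var_).isSome = true) := by
        apply hpre ⟨var_, comparator, value, destination⟩
        rw [htw]; exact List.mem_cons_self
      obtain ⟨⟨lo, hi⟩, hget⟩ := Option.isSome_iff_exists.mp hmem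
      have hrest : ∀ r ∈ rest.takeWhile (fun r => r.1 != "E"),
          ((working.get? r.1).isSome = true) := by
        intro r hr
        exact hpre r (htw ▸ List.mem_cons_of_mem _ hr)
      have hrest' : ∀ (v : Int × Int) (r : String × String × Int × String),
          r ∈ rest.takeWhile (fun r => r.1 != "E") →
          (((working.insert var_ v).get? r.1).isSome = true) := by
        intro v r hr
        exact isSome_get?_insert _ _ _ _ (hrest r hr)
      by_cases hc : comparator = ">"
      · -- ">" : a = max lo (value+1), b = hi
        simp only [evalA_go, evalB_go, hEb, Bool.false_eq_true, if_false, hget, hc,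
          BEq.rfl, if_true]
        by_cases h1 : value < lo
        · have ha : max lo (value + 1) ≤ lo ∧ hi ≤ hi := by omega
          simp [h1]
        · by_cases h2 : lo ≤ value ∧ value < hi
          · have hmax : max lo (value + 1) = value + 1 := by omega
            have hw : ¬ (max lo (value + 1) ≤ lo ∧ hi ≤ hi) := by omega
            have hs : max lo (value + 1) ≤ hi := by omega
            have hlt : lo < max lo (value + 1) := by omega
            simp only [h1, if_false, h2, if_true, hw, hs, hlt, if_true]
            rw [ih _ _ (hrest' _), hmax]
            simp
          · have hw : ¬ (max lo (value + 1) ≤ lo ∧ hi ≤ hi) := by omega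
            have hs : ¬ (max lo (value + 1) ≤ hi) := by omega
            simp only [h1, if_false, h2, if_false, hw, hs]
            exact ih acc working hrest
      · -- "<" (and anything else): a = lo, b = min hi (value-1)
        have hcb : (comparator == ">") = false := by simp [hc]
        simp only [evalA_go, evalB_go, hEb, Bool.false_eq_true, if_false, hget, hcb]
        by_cases h1 : hi < value
        · have ha : lo ≤ lo ∧ hi ≤ min hi (value - 1) := by omega
          simp [h1]
        · by_cases h2 : lo < value ∧ value ≤ hi
          · have hmin : min hi (value - 1) = value - 1 := by omega
            have hw : ¬ (lo ≤ lo ∧ hi ≤ min hi (value - 1)) := by omega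
            have hs : lo ≤ min hi (value - 1) := by omega
            have hlt : ¬ (lo < lo) := by omega
            simp only [h1, if_false, h2, if_true, hw, hs, hlt, if_true, if_false]
            rw [ih _ _ (hrest' _), hmin]
            simp
          · have hw : ¬ (lo ≤ lo ∧ hi ≤ min hi (value - 1)) := by omega
            have hs : ¬ (lo ≤ min hi (value - 1)) := by omega
            simp only [h1, if_false, h2, if_false, hw, hs]
            exact ih acc working hrest

-- ===== VERDICT (by name: the statement is the Claim_ definition above) =====
theorem evaluate_range_on_workflow_spec : Claim_equal_evaluate_range_on_workflow := by
  intro values_range workflow _ hpre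
  unfold Spec_evaluate_range_on_workflow evaluate_range_on_workflow evaluate_range_on_workflow_alt
  rw [go_eq workflow [] _ hpre]
  simp
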